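-- pv_equiv track=rewrite | github.com/Sideloading-Research/telegram_sideload | utils/style_samples_builder.py | _extract_raw_quotes
-- ===== SOURCE A (Python) =====
-- QUOTE_PREFIX = "QUOTE: "
--
-- def _find_quote_start_positions(text: str) -> list[int]:
--     """Returns positions where QUOTE: appears at the start of a line."""
--     positions = []
--     idx = 0
--     prefix_len = len(QUOTE_PREFIX)
--     while True:
--         pos = text.find(QUOTE_PREFIX, idx)
--         if pos == -1:
--             break
--         if pos == 0 or text[pos - 1] == '\n':
--             positions.append(pos)
--         idx = pos + prefix_len
--     return positions
--
-- def _extract_raw_quotes(text: str) -> list[str]: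
--     """Extracts the raw text following each QUOTE: marker (up to the next one)."""
--     positions = _find_quote_start_positions(text)
--     prefix_len = len(QUOTE_PREFIX)
--     raw_quotes = []
--     for i, pos in enumerate(positions):
--         start = pos + prefix_len
--         end = positions[i + 1] if i + 1 < len(positions) else len(text)
--         raw_quotes.append(text[start:end])
--     return raw_quotes
-- ===== SOURCE B (Python) =====
-- QUOTE_PREFIX = "QUOTE: "
--
-- def _extract_raw_quotes(text: str) -> list[str]:
--     """Single left-to-right scan: walk the text once with a line-start flag,
--     opening a new segment at each line-start QUOTE: marker and collecting
--     characters into the current segment (text before the first marker is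
--     discarded)."""
--     segments = []
--     cur = None  # None until the first marker is seen
--     at_line_start = True
--     i = 0
--     n = len(text)
--     while i < n:
--         if at_line_start and text.startswith(QUOTE_PREFIX, i):
--             if cur is not None:
--                 segments.append(''.join(cur))
--             cur = []
--             i += len(QUOTE_PREFIX)
--             at_line_start = False
--             continue
--         c = text[i]
--         if cur is not None:
--             cur.append(c)
--         at_line_start = c == '\n'
--         i += 1
--     if cur is not None:
--         segments.append(''.join(cur))
--     return segments
-- ===== Notes on version B (the rewrite author's own statement) =====
-- stated objective: alternative
-- what changed: Replaced the two-phase find-all-marker-positions-then-slice algorithm with a single left-to-right character scan that tracks a line-start flag and builds each segment incrementally as it goes.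
import Mathlib
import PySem

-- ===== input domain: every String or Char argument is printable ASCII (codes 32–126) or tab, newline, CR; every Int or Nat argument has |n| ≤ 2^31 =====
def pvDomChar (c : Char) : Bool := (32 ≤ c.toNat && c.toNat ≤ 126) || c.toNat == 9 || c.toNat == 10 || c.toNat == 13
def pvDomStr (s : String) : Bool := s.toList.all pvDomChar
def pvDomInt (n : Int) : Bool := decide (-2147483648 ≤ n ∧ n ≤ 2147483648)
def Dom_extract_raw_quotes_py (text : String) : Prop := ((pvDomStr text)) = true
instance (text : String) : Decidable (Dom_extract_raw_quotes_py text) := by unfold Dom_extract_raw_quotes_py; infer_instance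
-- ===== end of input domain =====

-- B replaces A's two-phase find-all-marker-positions-then-slice algorithm by a single
-- left-to-right scan with a line-start flag that builds each segment incrementally (alternative).

-- ===== PORT A =====
-- QUOTE_PREFIX = "QUOTE: "  (module-level constant shared by both implementations; as List Char)
def QUOTE_PREFIX : List Char := ['Q', 'U', 'O', 'T', 'E', ':', ' ']

-- facts needed by the ports' termination proofs (cited in their decreasing_by)
theorem pvLenQP : QUOTE_PREFIX.length = 7 := rfl

theorem pvFind_lt (cs : List Char) (idx : Nat) (hidx : idx ≤ cs.length)
    (h : ¬ PySem.Chars.findFrom cs QUOTE_PREFIX (idx : Int) = -1) :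
    idx ≤ (PySem.Chars.findFrom cs QUOTE_PREFIX (idx : Int)).toNat ∧
    (PySem.Chars.findFrom cs QUOTE_PREFIX (idx : Int)).toNat + 7 ≤ cs.length := by
  obtain ⟨h1, h2, -⟩ := PySem.Chars.findFrom_natCast_spec cs QUOTE_PREFIX idx hidx h
  have hlen := h2.length_le
  rw [List.length_drop, pvLenQP] at hlen
  omega

-- the while-loop of _find_quote_start_positions; hidx is the loop invariant idx ≤ len(text);
-- text.find(QUOTE_PREFIX, idx) is PySem.Chars.findFrom (exact); `pos == -1` is the break;
-- prefix_len = 7; the conditional append is the `if pos == 0 or text[pos-1] == '\n'` body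
def posLoopA (cs : List Char) (idx : Nat) (hidx : idx ≤ cs.length) : List Nat :=
  if h : PySem.Chars.findFrom cs QUOTE_PREFIX (idx : Int) = -1 then []
  else
    let p := (PySem.Chars.findFrom cs QUOTE_PREFIX (idx : Int)).toNat
    (if p = 0 ∨ PySem.List.pyGet? cs ((p : Int) - 1) = some '\n' then [p] else []) ++
      posLoopA cs (p + 7) (by have := pvFind_lt cs idx hidx h; omega)
termination_by cs.length + 1 - idx
decreasing_by have := pvFind_lt cs idx hidx h; omega

-- the for-loop of _extract_raw_quotes: text[pos+7 : positions[i+1] if i+1 < len else len(text)]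
def extractA (cs : List Char) : List Nat → List (List Char)
  | [] => []
  | p :: rest =>
      PySem.List.slice cs (some ((p : Int) + 7)) (some ((rest.headD cs.length : Nat) : Int)) ::
        extractA cs rest

def extract_raw_quotes_py (text : String) : List String :=
  (extractA text.toList (posLoopA text.toList 0 (Nat.zero_le _))).map String.ofList

-- ===== PORT B =====
-- B's single while-loop as structural recursion on the index, split by the two phases of
-- its `cur` state: bIdleB is cur = None (before the first marker), bActiveB is cur
-- collecting — it returns (rest of the current segment, list of later segments).
-- text.startswith(QUOTE_PREFIX, i) is PySem.Chars.startswith on cs.drop i (exact for 0 ≤ i).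
def bActiveB (cs : List Char) (i : Nat) (b : Bool) : List Char × List (List Char) :=
  if h : i < cs.length then
    if b && PySem.Chars.startswith (cs.drop i) QUOTE_PREFIX then
      let r := bActiveB cs (i + QUOTE_PREFIX.length) false
      ([], r.1 :: r.2)
    else
      let r := bActiveB cs (i + 1) (cs[i] == '\n')
      (cs[i] :: r.1, r.2)
  else ([], [])
termination_by cs.length - i
decreasing_by all_goals (have := pvLenQP; omega)

def bIdleB (cs : List Char) (i : Nat) (b : Bool) : List (List Char) :=
  if h : i < cs.length then
    if b && PySem.Chars.startswith (cs.drop i) QUOTE_PREFIX then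
      let r := bActiveB cs (i + QUOTE_PREFIX.length) false
      r.1 :: r.2
    else bIdleB cs (i + 1) (cs[i] == '\n')
  else []
termination_by cs.length - i
decreasing_by have := pvLenQP; omega

def extract_raw_quotes_py_alt (text : String) : List String :=
  (bIdleB text.toList 0 true).map String.ofList

-- ===== PRECONDITION & SPEC =====
def Spec_extract_raw_quotes_py (text : String) (out : List String) : Prop := out = extract_raw_quotes_py_alt text
instance (text : String) (out : List String) : Decidable (Spec_extract_raw_quotes_py text out) := by unfold Spec_extract_raw_quotes_py; infer_instance

-- ===== CLAIM (what is proved, stated in full; the proofs are below) =====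
def Claim_equal_extract_raw_quotes_py : Prop := ∀ (text : String), Dom_extract_raw_quotes_py text → Spec_extract_raw_quotes_py text (extract_raw_quotes_py text)

-- ===== LEMMAS AND PROOFS =====

-- `lsb cs i` : the value of B's at_line_start flag when the scan is at index i
def lsb (cs : List Char) (i : Nat) : Bool := i == 0 || (cs[i-1]? == some '\n')

-- `occb cs i` : QUOTE_PREFIX occurs in cs at position i
def occb (cs : List Char) (i : Nat) : Bool := QUOTE_PREFIX.isPrefixOf (cs.drop i)

-- reference marker-position list: step by 1, emit and jump by 7 at a line-start occurrence
def P1 (cs : List Char) (i : Nat) : List Nat :=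
  if h : i < cs.length then
    if occb cs i && lsb cs i then i :: P1 cs (i + 7) else P1 cs (i + 1)
  else []
termination_by cs.length - i

theorem startswith_eq (s p : List Char) : PySem.Chars.startswith s p = p.isPrefixOf s :=
  Bool.le_antisymm (fun a => a) (fun a => a)

-- unfolding equations (zeta-reduced forms of the ports' bodies)
theorem posLoopA_pos (cs : List Char) (idx : Nat) (hidx : idx ≤ cs.length)
    (h : ¬ PySem.Chars.findFrom cs QUOTE_PREFIX (idx : Int) = -1) :
    posLoopA cs idx hidx =
      (if (PySem.Chars.findFrom cs QUOTE_PREFIX (idx : Int)).toNat = 0 ∨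
          PySem.List.pyGet? cs
            (((PySem.Chars.findFrom cs QUOTE_PREFIX (idx : Int)).toNat : Int) - 1) = some '\n'
        then [(PySem.Chars.findFrom cs QUOTE_PREFIX (idx : Int)).toNat] else []) ++
      posLoopA cs ((PySem.Chars.findFrom cs QUOTE_PREFIX (idx : Int)).toNat + 7)
        (by have := pvFind_lt cs idx hidx h; omega) := by
  rw [posLoopA]
  exact dif_neg h

theorem bActiveB_pos {cs : List Char} {i : Nat} {b : Bool} (h : i < cs.length)
    (hc : (b && PySem.Chars.startswith (cs.drop i) QUOTE_PREFIX) = true) :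
    bActiveB cs i b = ([], (bActiveB cs (i + 7) false).1 :: (bActiveB cs (i + 7) false).2) := by
  rw [bActiveB, dif_pos h, if_pos hc]
  rfl

theorem bActiveB_neg {cs : List Char} {i : Nat} {b : Bool} (h : i < cs.length)
    (hc : ¬ (b && PySem.Chars.startswith (cs.drop i) QUOTE_PREFIX) = true) :
    bActiveB cs i b =
      (cs[i] :: (bActiveB cs (i + 1) (cs[i] == '\n')).1,
        (bActiveB cs (i + 1) (cs[i] == '\n')).2) := by
  rw [bActiveB, dif_pos h, if_neg hc]

theorem bActiveB_end {cs : List Char} {i : Nat} {b : Bool} (h : ¬ i < cs.length) :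
    bActiveB cs i b = ([], []) := by
  rw [bActiveB, dif_neg h]

theorem bIdleB_pos {cs : List Char} {i : Nat} {b : Bool} (h : i < cs.length)
    (hc : (b && PySem.Chars.startswith (cs.drop i) QUOTE_PREFIX) = true) :
    bIdleB cs i b = (bActiveB cs (i + 7) false).1 :: (bActiveB cs (i + 7) false).2 := by
  rw [bIdleB, dif_pos h, if_pos hc]
  rfl

theorem bIdleB_neg {cs : List Char} {i : Nat} {b : Bool} (h : i < cs.length)
    (hc : ¬ (b && PySem.Chars.startswith (cs.drop i) QUOTE_PREFIX) = true) :
    bIdleB cs i b = bIdleB cs (i + 1) (cs[i] == '\n') := by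
  rw [bIdleB, dif_pos h, if_neg hc]

theorem bIdleB_end {cs : List Char} {i : Nat} {b : Bool} (h : ¬ i < cs.length) :
    bIdleB cs i b = [] := by
  rw [bIdleB, dif_neg h]

theorem occb_len {cs : List Char} {i : Nat} (h : occb cs i = true) : i + 7 ≤ cs.length := by
  have hlen := (List.isPrefixOf_iff_prefix.mp h).length_le
  rw [List.length_drop, pvLenQP] at hlen
  omega

theorem occb_get {cs : List Char} {i : Nat} (h : occb cs i = true) (k : Nat) (hk : k < 7) :
    cs[i + k]? = QUOTE_PREFIX[k]? := by
  obtain ⟨t, ht⟩ := List.isPrefixOf_iff_prefix.mp h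
  have hd : (List.drop i cs)[k]? = cs[i + k]? := List.getElem?_drop
  rw [← hd, ← ht, List.getElem?_append_left (by rw [pvLenQP]; exact hk)]

theorem lsb_gap {cs : List Char} {i j : Nat} (h : occb cs i = true) (h1 : i < j)
    (h2 : j ≤ i + 7) : lsb cs j = false := by
  have hg : cs[i + (j - 1 - i)]? = QUOTE_PREFIX[j - 1 - i]? := occb_get h _ (by omega)
  have hij : i + (j - 1 - i) = j - 1 := by omega
  rw [hij] at hg
  simp only [lsb, Bool.or_eq_false_iff, beq_eq_false_iff_ne]
  refine ⟨by simp; omega, ?_⟩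
  rw [hg]
  exact (by decide : ∀ k, k < 7 → QUOTE_PREFIX[k]? ≠ some '\n') _ (by omega)

theorem P1_ge (cs : List Char) (i : Nat) : ∀ j ∈ P1 cs i, i ≤ j := by
  induction i using P1.induct cs with
  | case1 x hx hc ih =>
      intro j hj
      rw [P1, dif_pos hx, if_pos hc] at hj
      rcases List.mem_cons.mp hj with rfl | hj2
      · omega
      · have := ih j hj2; omega
  | case2 x hx hc ih =>
      intro j hj
      rw [P1, dif_pos hx, if_neg hc] at hj
      have := ih j hj; omega
  | case3 x hx =>
      intro j hj
      rw [P1, dif_neg hx] at hj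
      simp at hj

theorem P1_nil (cs : List Char) : ∀ i, (∀ j, i ≤ j → occb cs j = false) → P1 cs i = [] := by
  intro i
  induction i using P1.induct cs with
  | case1 x hx hc ih =>
      intro h
      have := h x le_rfl
      simp [this] at hc
  | case2 x hx hc ih =>
      intro h
      rw [P1, dif_pos hx, if_neg hc]
      refine ih fun j hj => h j ?_
      omega
  | case3 x hx =>
      intro h
      rw [P1, dif_neg hx]

theorem P1_skip_aux (cs : List Char) : ∀ (d i : Nat), i + d ≤ cs.length →
    (∀ j, i ≤ j → j < i + d → (occb cs j && lsb cs j) = false) → P1 cs i = P1 cs (i + d) := by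
  intro d
  induction d with
  | zero => intro i _ _; rfl
  | succ d ih =>
      intro i hle h
      have hi : i < cs.length := by omega
      rw [P1, dif_pos hi, if_neg (by simp [h i le_rfl (by omega)])]
      have harr : i + 1 + d = i + (d + 1) := by omega
      rw [← harr]
      refine ih (i + 1) (by omega) fun j hj hj2 => h j ?_ ?_ <;> omega

theorem P1_skip {cs : List Char} {i p : Nat} (hip : i ≤ p) (hp : p ≤ cs.length)
    (h : ∀ j, i ≤ j → j < p → (occb cs j && lsb cs j) = false) : P1 cs i = P1 cs p := by
  have hres : P1 cs i = P1 cs (i + (p - i)) := by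
    refine P1_skip_aux cs (p - i) i (by omega) fun j hj hj2 => h j hj ?_
    omega
  rwa [(by omega : i + (p - i) = p)] at hres

theorem prefix_drop_infix {cs sub : List Char} {k j : Nat} (hk : k ≤ j)
    (h : sub <+: cs.drop j) : sub <:+: cs.drop k := by
  have hdd : cs.drop j = (cs.drop k).drop (j - k) := by
    rw [List.drop_drop]; congr 1; omega
  rw [hdd] at h
  exact h.isInfix.trans (List.drop_suffix _ _).isInfix

theorem posLoopA_eq_P1 (cs : List Char) (idx : Nat) (hidx : idx ≤ cs.length) :
    posLoopA cs idx hidx = P1 cs idx := by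
  induction hn : cs.length + 1 - idx using Nat.strong_induction_on generalizing idx with
  | _ n ih =>
  subst hn
  by_cases h : PySem.Chars.findFrom cs QUOTE_PREFIX (idx : Int) = -1
  · rw [posLoopA, dif_pos h]
    refine (P1_nil cs idx (fun j hj => ?_)).symm
    by_contra hc
    have hocc : QUOTE_PREFIX <+: cs.drop j :=
      List.isPrefixOf_iff_prefix.mp (by simpa [occb] using hc)
    exact ((PySem.Chars.findFrom_natCast_eq_neg_one_iff cs QUOTE_PREFIX idx hidx).mp h)
      (prefix_drop_infix hj hocc)
  · rw [posLoopA_pos cs idx hidx h]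
    obtain ⟨h1, h2, h3⟩ := PySem.Chars.findFrom_natCast_spec cs QUOTE_PREFIX idx hidx h
    set p := (PySem.Chars.findFrom cs QUOTE_PREFIX (idx : Int)).toNat with hpdef
    have hip : idx ≤ p := by omega
    have hocc : occb cs p = true := List.isPrefixOf_iff_prefix.mpr h2
    have hp7 : p + 7 ≤ cs.length := occb_len hocc
    have hplt : p < cs.length := by omega
    have hskip : P1 cs idx = P1 cs p := by
      refine P1_skip hip (by omega) (fun j hj hj2 => ?_)
      have hoj : occb cs j = false := by
        by_contra hc
        exact h3 j hj hj2 (List.isPrefixOf_iff_prefix.mp (by simpa [occb] using hc))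
      simp [hoj]
    have hcond : (p = 0 ∨ PySem.List.pyGet? cs ((p : Int) - 1) = some '\n') ↔ lsb cs p = true := by
      constructor
      · rintro (h0 | hnl)
        · simp [lsb, h0]
        · rcases Nat.eq_zero_or_pos p with h0 | h0
          · simp [lsb, h0]
          · have hcast : ((p : Int) - 1) = ((p - 1 : Nat) : Int) := by omega
            rw [hcast, PySem.List.pyGet?_natCast] at hnl
            simp [lsb, hnl]
      · intro hl
        simp only [lsb, Bool.or_eq_true, beq_iff_eq] at hl
        rcases hl with h0 | hnl
        · left; simpa using h0
        · rcases Nat.eq_zero_or_pos p with h0 | h0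
          · left; exact h0
          · right
            have hcast : ((p : Int) - 1) = ((p - 1 : Nat) : Int) := by omega
            rw [hcast, PySem.List.pyGet?_natCast]
            exact hnl
    rw [hskip]
    by_cases hl : lsb cs p = true
    · rw [if_pos (hcond.mpr hl)]
      rw [P1, dif_pos hplt, if_pos (by simp [hocc, hl])]
      rw [ih (cs.length + 1 - (p + 7)) (by omega) (p + 7) (by omega) rfl]
      rfl
    · rw [if_neg (fun hc => hl (hcond.mp hc))]
      rw [P1, dif_pos hplt, if_neg (by simp [Bool.eq_false_iff.mpr hl])]
      have hstep : P1 cs (p + 1) = P1 cs (p + 7) := by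
        refine P1_skip (by omega) (by omega) (fun j hj hj2 => ?_)
        simp [lsb_gap hocc (by omega : p < j) (by omega)]
      rw [hstep]
      rw [ih (cs.length + 1 - (p + 7)) (by omega) (p + 7) (by omega) rfl]
      simp

theorem headD_ge {cs : List Char} {i : Nat} (hm : i ≤ cs.length) :
    i ≤ (P1 cs i).headD cs.length := by
  cases hp : P1 cs i with
  | nil => simpa using hm
  | cons q t =>
      have := P1_ge cs i q (by simp [hp])
      simpa using this

theorem slice_bridge (cs : List Char) (x m : Nat) :
    PySem.List.slice cs (some ((x : Int) + 7)) (some (m : Int)) =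
      (cs.drop (x + 7)).take (m - (x + 7)) := by
  have hcast : ((x : Int) + 7) = ((x + 7 : Nat) : Int) := by push_cast; ring
  rw [hcast, PySem.List.slice_natCast]

theorem cond_bridge {cs : List Char} {i : Nat} {b : Bool} (hb : b = lsb cs i) :
    (b && PySem.Chars.startswith (cs.drop i) QUOTE_PREFIX) = (occb cs i && lsb cs i) := by
  rw [hb, startswith_eq, Bool.and_comm]
  rfl

theorem next_flag {cs : List Char} {i : Nat} (h : i < cs.length) :
    (cs[i] == '\n') = lsb cs (i + 1) := by
  simp [lsb, List.getElem?_eq_getElem h]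

theorem bActiveB_eq (cs : List Char) : ∀ (i : Nat) (b : Bool), i ≤ cs.length → b = lsb cs i →
    bActiveB cs i b =
      ((cs.drop i).take ((P1 cs i).headD cs.length - i), extractA cs (P1 cs i)) := by
  intro i b
  induction i, b using bActiveB.induct cs with
  | case1 x b hx hc ih =>
      intro hi hb
      have hcond : (occb cs x && lsb cs x) = true := (cond_bridge hb).symm.trans hc
      have hab := hcond
      simp only [Bool.and_eq_true] at hab
      obtain ⟨hocc, hlsb⟩ := hab
      have h7 : x + 7 ≤ cs.length := occb_len hocc
      have hf : lsb cs (x + 7) = false := lsb_gap hocc (by omega) (by omega)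
      simp only [pvLenQP] at ih
      have IH := ih (by omega) hf.symm
      rw [P1, dif_pos hx, if_pos hcond, bActiveB_pos hx hc, IH]
      simp [extractA, slice_bridge]
  | case2 x b hx hc ih =>
      intro hi hb
      have hcond : ¬ (occb cs x && lsb cs x) = true := fun hcc =>
        hc ((cond_bridge hb).trans hcc)
      have IH := ih (by omega) (next_flag hx)
      rw [P1, dif_pos hx, if_neg hcond, bActiveB_neg hx hc, IH]
      have hm : x + 1 ≤ (P1 cs (x + 1)).headD cs.length := headD_ge (by omega)
      refine Prod.ext ?_ rfl
      simp only
      rw [List.drop_eq_getElem_cons hx,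
        (by omega : (P1 cs (x + 1)).headD cs.length - x = ((P1 cs (x + 1)).headD cs.length - (x + 1)) + 1),
        List.take_succ_cons]
  | case3 x b hx =>
      intro hi hb
      have hx' : x = cs.length := by omega
      rw [P1, dif_neg hx, bActiveB_end hx]
      simp [extractA, hx']

theorem bIdleB_eq (cs : List Char) : ∀ (i : Nat) (b : Bool), i ≤ cs.length → b = lsb cs i →
    bIdleB cs i b = extractA cs (P1 cs i) := by
  intro i b
  induction i, b using bIdleB.induct cs with
  | case1 x b hx hc =>
      intro hi hb
      have hcond : (occb cs x && lsb cs x) = true := (cond_bridge hb).symm.trans hc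
      have hab := hcond
      simp only [Bool.and_eq_true] at hab
      obtain ⟨hocc, hlsb⟩ := hab
      have h7 : x + 7 ≤ cs.length := occb_len hocc
      have hf : lsb cs (x + 7) = false := lsb_gap hocc (by omega) (by omega)
      rw [P1, dif_pos hx, if_pos hcond, bIdleB_pos hx hc,
        bActiveB_eq cs (x + 7) false (by omega) hf.symm]
      simp [extractA, slice_bridge]
  | case2 x b hx hc ih =>
      intro hi hb
      have hcond : ¬ (occb cs x && lsb cs x) = true := fun hcc =>
        hc ((cond_bridge hb).trans hcc)
      rw [P1, dif_pos hx, if_neg hcond, bIdleB_neg hx hc, ih (by omega) (next_flag hx)]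
  | case3 x b hx =>
      intro hi hb
      rw [P1, dif_neg hx, bIdleB_end hx]
      rfl

-- ===== VERDICT (by name: the statement is the Claim_ definition above) =====
theorem extract_raw_quotes_py_spec : Claim_equal_extract_raw_quotes_py := by
  intro text _
  unfold Spec_extract_raw_quotes_py extract_raw_quotes_py extract_raw_quotes_py_alt
  rw [posLoopA_eq_P1, bIdleB_eq text.toList 0 true (Nat.zero_le _) (by simp [lsb])]
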